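-- pv_equiv track=rewrite | github.com/Vegas30/Python | HomeWork/HW29_30/hw29_30.py | calculate_min_max_grades
-- ===== SOURCE A (Python) =====
-- def calculate_min_max_grades(students):
--     min_max_grades = {}
--     for student in students:
--         for subject, grade in student['grades'].items():
--             if subject not in min_max_grades:
--                 min_max_grades[subject] = (grade, grade)
--             else:
--                 current_min, current_max = min_max_grades[subject]
--                 min_max_grades[subject] = (min(current_min, grade)), (max(current_max, grade))
--
--     return min_max_grades
-- ===== SOURCE B (Python) =====
-- def calculate_min_max_grades(students):
--     # Two-phase: group all grades per subject, then reduce each group to (min, max).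
--     groups = {}
--     for student in students:
--         for subject, grade in student['grades'].items():
--             groups.setdefault(subject, []).append(grade)
--     return {subject: (min(grades), max(grades)) for subject, grades in groups.items()}
-- ===== Notes on version B (the rewrite author's own statement) =====
-- stated objective: alternative
-- what changed: Replaces the running min/max tuple updated under a containment branch by a branch-free group phase (setdefault-append building full per-subject grade lists) followed by a separate reduce phase taking min/max of each list.
import Mathlib
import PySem

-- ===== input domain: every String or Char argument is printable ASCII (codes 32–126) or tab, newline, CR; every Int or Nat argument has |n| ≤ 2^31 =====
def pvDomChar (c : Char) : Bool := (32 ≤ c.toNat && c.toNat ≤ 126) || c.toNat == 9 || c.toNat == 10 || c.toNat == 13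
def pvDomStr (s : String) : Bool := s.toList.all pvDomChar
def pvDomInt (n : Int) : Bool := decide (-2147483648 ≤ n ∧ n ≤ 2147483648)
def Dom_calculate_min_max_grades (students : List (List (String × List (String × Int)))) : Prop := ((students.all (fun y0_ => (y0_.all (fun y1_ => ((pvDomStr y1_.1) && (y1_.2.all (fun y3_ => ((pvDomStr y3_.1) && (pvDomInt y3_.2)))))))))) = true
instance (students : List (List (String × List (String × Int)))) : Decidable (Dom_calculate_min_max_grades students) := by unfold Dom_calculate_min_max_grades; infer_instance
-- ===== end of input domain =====

-- B groups all grades per subject first and reduces each list to (min, max) afterwards,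
-- instead of A's running min/max tuple updated under a containment branch; same cost, alternative decomposition.

-- ===== PORT A =====
-- A: one dict of running (min, max) tuples, updated in place per grade.
def calculate_min_max_grades (students : List (List (String × List (String × Int)))) : List (String × Int × Int) :=
  (students.foldl (fun mmg student =>
      ((PySem.Dict.mk student).getD "grades" []).foldl (fun mmg sg =>
          if mmg.contains sg.1 = false then
            mmg.insert sg.1 (sg.2, sg.2)
          else
            let c := mmg.getD sg.1 (0, 0)   -- present: the default is never used (contains is true)
            mmg.insert sg.1 (min c.1 sg.2, max c.2 sg.2)) mmg)
    PySem.Dict.empty).items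

-- ===== PORT B =====
-- B: group phase (setdefault-append = Dict.modify with [] default), then reduce phase.
-- Every grouped list is nonempty by construction, so the `.getD 0` after min?/max? (Python's min/max of a
-- nonempty list) is never the default.
def calculate_min_max_grades_alt (students : List (List (String × List (String × Int)))) : List (String × Int × Int) :=
  let groups := students.foldl (fun groups student =>
      ((PySem.Dict.mk student).getD "grades" []).foldl (fun groups sg =>
          groups.modify sg.1 [] (· ++ [sg.2])) groups)
    PySem.Dict.empty
  groups.items.map (fun p =>
    (p.1, ((PySem.List.min? p.2 (fun x => x)).getD 0, (PySem.List.max? p.2 (fun x => x)).getD 0)))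

-- ===== PRECONDITION & SPEC =====
-- Pre_ excludes exactly the students dicts missing the key 'grades', on which Python A raises KeyError.
def Pre_calculate_min_max_grades (students : List (List (String × List (String × Int)))) : Prop :=
  ∀ student ∈ students, (PySem.Dict.mk student).contains "grades" = true
instance (students : List (List (String × List (String × Int)))) : Decidable (Pre_calculate_min_max_grades students) := by unfold Pre_calculate_min_max_grades; infer_instance

def pvWitness_calculate_min_max_grades : (List (List (String × List (String × Int)))) :=
  [[("grades", [("math", 5), ("eng", 3)])], [("grades", [("math", 2)])]]

def Spec_calculate_min_max_grades (students : List (List (String × List (String × Int)))) (out : List (String × Int × Int)) : Prop := out = calculate_min_max_grades_alt students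
instance (students : List (List (String × List (String × Int)))) (out : List (String × Int × Int)) : Decidable (Spec_calculate_min_max_grades students out) := by unfold Spec_calculate_min_max_grades; infer_instance

-- ===== CLAIM (what is proved, stated in full; the proofs are below) =====
def Claim_equal_calculate_min_max_grades : Prop := ∀ (students : List (List (String × List (String × Int)))), Dom_calculate_min_max_grades students → Pre_calculate_min_max_grades students → Spec_calculate_min_max_grades students (calculate_min_max_grades students)

-- ===== LEMMAS AND PROOFS =====
lemma pv_foldl_some {α : Type} (step : Option α → α → Option α)
    (hs : ∀ m x, (step (some m) x).isSome) :
    ∀ (l : List α) (acc : Option α), acc.isSome → (l.foldl step acc).isSome := by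
  intro l
  induction l with
  | nil => intro acc h; exact h
  | cons x xs ih =>
    intro acc h
    obtain ⟨m, rfl⟩ := Option.isSome_iff_exists.mp h
    exact ih _ (hs m x)

lemma pv_min?_isSome (l : List Int) (h : l ≠ []) :
    (PySem.List.min? l (fun x => x)).isSome := by
  cases l with
  | nil => exact absurd rfl h
  | cons x xs =>
    show (List.foldl _ (none : Option Int) (x :: xs)).isSome
    simp only [List.foldl_cons]
    refine pv_foldl_some _ ?_ xs (some x) rfl
    intro m y
    dsimp only
    split <;> rfl

lemma pv_max?_isSome (l : List Int) (h : l ≠ []) :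
    (PySem.List.max? l (fun x => x)).isSome := by
  cases l with
  | nil => exact absurd rfl h
  | cons x xs =>
    show (List.foldl _ (none : Option Int) (x :: xs)).isSome
    simp only [List.foldl_cons]
    refine pv_foldl_some _ ?_ xs (some x) rfl
    intro m y
    dsimp only
    split <;> rfl

lemma pv_min?_append (l : List Int) (g : Int) :
    PySem.List.min? (l ++ [g]) (fun x => x) =
      match PySem.List.min? l (fun x => x) with
      | none => some g
      | some m => if g < m then some g else some m := by
  show List.foldl _ none (l ++ [g]) = _
  rw [List.foldl_append]
  show List.foldl _ (PySem.List.min? l (fun x => x)) [g] = _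
  cases PySem.List.min? l (fun x => x) <;> rfl

lemma pv_max?_append (l : List Int) (g : Int) :
    PySem.List.max? (l ++ [g]) (fun x => x) =
      match PySem.List.max? l (fun x => x) with
      | none => some g
      | some m => if m < g then some g else some m := by
  show List.foldl _ none (l ++ [g]) = _
  rw [List.foldl_append]
  show List.foldl _ (PySem.List.max? l (fun x => x)) [g] = _
  cases PySem.List.max? l (fun x => x) <;> rfl

def pvMM (l : List Int) : Int × Int :=
  ((PySem.List.min? l (fun x => x)).getD 0, (PySem.List.max? l (fun x => x)).getD 0)

lemma pvMM_append (l : List Int) (h : l ≠ []) (g : Int) :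
    pvMM (l ++ [g]) = (min (pvMM l).1 g, max (pvMM l).2 g) := by
  obtain ⟨m, hm⟩ := Option.isSome_iff_exists.mp (pv_min?_isSome l h)
  obtain ⟨M, hM⟩ := Option.isSome_iff_exists.mp (pv_max?_isSome l h)
  unfold pvMM
  rw [pv_min?_append, pv_max?_append, hm, hM]
  dsimp only
  refine Prod.ext ?_ ?_ <;> dsimp only <;> split <;> simp <;> omega

lemma pvMM_single (g : Int) : pvMM [g] = (g, g) := by
  simp [pvMM, PySem.List.min?, PySem.List.max?, List.foldl]

def pvStepA (d : PySem.Dict String (Int × Int)) (sg : String × Int) : PySem.Dict String (Int × Int) :=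
  if d.contains sg.1 = false then
    d.insert sg.1 (sg.2, sg.2)
  else
    let c := d.getD sg.1 (0, 0)
    d.insert sg.1 (min c.1 sg.2, max c.2 sg.2)

def pvStepB (g : PySem.Dict String (List Int)) (sg : String × Int) : PySem.Dict String (List Int) :=
  g.modify sg.1 [] (· ++ [sg.2])

def pvRel (dA : PySem.Dict String (Int × Int)) (gB : PySem.Dict String (List Int)) : Prop :=
  dA.items = gB.items.map (fun p => (p.1, pvMM p.2))
  ∧ gB.keys.Nodup
  ∧ ∀ p ∈ gB.items, p.2 ≠ []

lemma pvRel_keys {dA : PySem.Dict String (Int × Int)} {gB : PySem.Dict String (List Int)}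
    (h : pvRel dA gB) : dA.keys = gB.keys := by
  simp only [PySem.Dict.keys, h.1, List.map_map]
  rfl

lemma pvRel_step {dA : PySem.Dict String (Int × Int)} {gB : PySem.Dict String (List Int)}
    (h : pvRel dA gB) (sg : String × Int) : pvRel (pvStepA dA sg) (pvStepB gB sg) := by
  obtain ⟨hi, hnd, hne⟩ := h
  have hkeys : dA.keys = gB.keys := pvRel_keys ⟨hi, hnd, hne⟩
  have hAnd : dA.keys.Nodup := hkeys ▸ hnd
  have hc : dA.contains sg.1 = gB.contains sg.1 := by
    rw [PySem.Dict.contains_eq_decide_mem_keys, PySem.Dict.contains_eq_decide_mem_keys, hkeys]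
  unfold pvStepA pvStepB PySem.Dict.modify
  by_cases hgc : gB.contains sg.1 = true
  · -- subject already present
    have hAc : dA.contains sg.1 = true := by rw [hc, hgc]
    obtain ⟨lst, hget⟩ := Option.isSome_iff_exists.mp
      (by rw [← PySem.Dict.contains_eq_isSome_get?, hgc] : (gB.get? sg.1).isSome)
    have hmem : (sg.1, lst) ∈ gB.items := (PySem.Dict.get?_eq_some_iff_mem_items gB _ _ hnd).mp hget
    have hlne : lst ≠ [] := hne _ hmem
    have hAmem : (sg.1, pvMM lst) ∈ dA.items := by
      rw [hi]; exact List.mem_map_of_mem hmem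
    have hgetA : dA.getD sg.1 (0, 0) = pvMM lst := PySem.Dict.getD_of_mem_items dA hAmem hAnd _
    have hgetB : gB.getD sg.1 [] = lst := PySem.Dict.getD_of_mem_items gB hmem hnd _
    simp only [hAc, Bool.true_eq_false, ite_false, hgetA, hgetB]
    refine ⟨?_, ?_, ?_⟩
    · rw [PySem.Dict.items_insert_of_contains dA _ hAc, PySem.Dict.items_insert_of_contains gB _ hgc,
        hi, List.map_map, List.map_map]
      refine List.map_congr_left ?_
      intro p hp
      by_cases hp1 : p.1 = sg.1
      · have hp2 : p.2 = lst := by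
          have h1 := PySem.Dict.getD_of_mem_items gB hp hnd ([] : List Int)
          rw [hp1] at h1; rw [← h1, hgetB]
        simp only [Function.comp, hp1, hp2, beq_self_eq_true, ite_true]
        rw [pvMM_append lst hlne sg.2]
      · have hb : (p.1 == sg.1) = false := by simpa using hp1
        simp [Function.comp, hb]
    · rwa [PySem.Dict.keys_insert_of_contains gB _ hgc]
    · intro p hp
      rw [PySem.Dict.items_insert_of_contains gB _ hgc] at hp
      obtain ⟨q, hq, rfl⟩ := List.mem_map.mp hp
      by_cases hq1 : q.1 = sg.1
      · simp only [hq1, beq_self_eq_true, ite_true]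
        simp
      · have hb : (q.1 == sg.1) = false := by simpa using hq1
        simp only [hb, Bool.false_eq_true, ite_false]
        exact hne q hq
  · -- new subject
    have hgc' : gB.contains sg.1 = false := by simpa using hgc
    have hAc : dA.contains sg.1 = false := by rw [hc, hgc']
    have hnm : sg.1 ∉ gB.keys := by
      rw [PySem.Dict.contains_eq_decide_mem_keys] at hgc'; simpa using hgc'
    simp only [hAc, ite_true, PySem.Dict.getD_of_not_contains gB _ hgc', List.nil_append]
    refine ⟨?_, ?_, ?_⟩
    · rw [PySem.Dict.items_insert_of_not_contains dA _ hAc,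
        PySem.Dict.items_insert_of_not_contains gB _ hgc', hi, List.map_append]
      simp [pvMM_single]
    · rw [PySem.Dict.keys_insert_of_not_contains gB _ hgc']
      simp only [List.nodup_append]
      refine ⟨hnd, List.nodup_singleton _, ?_⟩
      intro a ha b hb
      simp only [List.mem_singleton] at hb
      subst hb
      exact fun hab => hnm (hab ▸ ha)
    · intro p hp
      rw [PySem.Dict.items_insert_of_not_contains gB _ hgc'] at hp
      rcases List.mem_append.mp hp with h1 | h1
      · exact hne p h1
      · simp only [List.mem_singleton] at h1
        subst h1; simp

lemma pvRel_foldl {dA : PySem.Dict String (Int × Int)} {gB : PySem.Dict String (List Int)}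
    (h : pvRel dA gB) (l : List (String × Int)) :
    pvRel (l.foldl pvStepA dA) (l.foldl pvStepB gB) := by
  induction l generalizing dA gB with
  | nil => exact h
  | cons x xs ih => exact ih (pvRel_step h x)

lemma pvRel_students {dA : PySem.Dict String (Int × Int)} {gB : PySem.Dict String (List Int)}
    (h : pvRel dA gB) (students : List (List (String × List (String × Int)))) :
    pvRel
      (students.foldl (fun d st => ((PySem.Dict.mk st).getD "grades" []).foldl pvStepA d) dA)
      (students.foldl (fun g st => ((PySem.Dict.mk st).getD "grades" []).foldl pvStepB g) gB) := by
  induction students generalizing dA gB with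
  | nil => exact h
  | cons st sts ih => exact ih (pvRel_foldl h _)

-- ===== VERDICT (by name: the statement is the Claim_ definition above) =====
theorem calculate_min_max_grades_spec : Claim_equal_calculate_min_max_grades := by
  intro students _ _
  unfold Spec_calculate_min_max_grades calculate_min_max_grades calculate_min_max_grades_alt
  have h0 : pvRel PySem.Dict.empty PySem.Dict.empty := by
    refine ⟨rfl, by simp [PySem.Dict.keys, PySem.Dict.empty], by simp [PySem.Dict.empty]⟩
  have h := pvRel_students h0 students
  exact h.1
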